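-- pv_equiv track=rewrite | github.com/GrimLord16/test_ml | task2/ner/inference.py | _collect_spans
-- ===== SOURCE A (Python) =====
-- def _collect_spans(pairs: list[tuple[str, str]], b_tag: str, i_tag: str) -> list[str]:
--     """Reconstruct entity spans from word-label pairs for the given B/I tag pair."""
--     entities: list[str] = []
--     current: list[str] = []
--
--     for word, label in pairs:
--         if label == b_tag:
--             if current:
--                 entities.append(" ".join(current))
--             current = [word]
--         elif label == i_tag and current:
--             current.append(word)
--         else:
--             if current:
--                 entities.append(" ".join(current))
--                 current = []
--
--     if current:
--         entities.append(" ".join(current))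
--
--     return [e.rstrip(".,!?;:").lower() for e in entities if e.rstrip(".,!?;:")]
-- ===== SOURCE B (Python) =====
-- def _collect_spans(pairs: list[tuple[str, str]], b_tag: str, i_tag: str) -> list[str]:
--     """Locate each B-tagged start by index, extend it over following I-tagged
--     tokens in an inner loop, and emit the span whole (no flush state)."""
--     spans: list[str] = []
--     i, n = 0, len(pairs)
--     while i < n:
--         word, label = pairs[i]
--         if label == b_tag:
--             span = [word]
--             i += 1
--             while i < n and pairs[i][1] == i_tag and pairs[i][1] != b_tag:
--                 span.append(pairs[i][0])
--                 i += 1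
--             spans.append(" ".join(span))
--         else:
--             i += 1
--     return [e.rstrip(".,!?;:").lower() for e in spans if e.rstrip(".,!?;:")]
-- ===== Notes on version B (the rewrite author's own statement) =====
-- stated objective: alternative
-- what changed: A's single stateful accumulate-and-flush pass (current buffer flushed on three different events) is replaced by an index-driven outer scan that finds each B-tagged start and an inner loop that extends the span over following I-tagged tokens, emitting each span whole with no flush state.
import Mathlib
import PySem

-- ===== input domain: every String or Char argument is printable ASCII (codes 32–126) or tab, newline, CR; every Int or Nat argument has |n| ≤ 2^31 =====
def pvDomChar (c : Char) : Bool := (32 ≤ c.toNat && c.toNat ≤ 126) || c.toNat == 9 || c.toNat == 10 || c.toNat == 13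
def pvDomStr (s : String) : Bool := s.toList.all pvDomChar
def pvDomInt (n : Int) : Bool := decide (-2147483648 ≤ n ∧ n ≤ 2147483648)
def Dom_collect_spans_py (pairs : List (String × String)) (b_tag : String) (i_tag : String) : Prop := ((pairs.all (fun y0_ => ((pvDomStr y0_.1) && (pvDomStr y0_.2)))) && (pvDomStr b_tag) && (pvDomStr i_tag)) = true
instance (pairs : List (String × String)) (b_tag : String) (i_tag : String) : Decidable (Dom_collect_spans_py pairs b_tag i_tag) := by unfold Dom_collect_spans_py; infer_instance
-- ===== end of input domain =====

-- B replaces A's accumulate-and-flush state machine by a locate-B-then-extend nested scan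
-- that builds each span whole (objective: alternative decomposition, same cost).

-- shared final comprehension: [e.rstrip(".,!?;:").lower() for e in es if e.rstrip(".,!?;:")]
-- hand port of str.rstrip(".,!?;:"): drop trailing chars from that set (exact on ASCII)
def pvRstripPunct (s : String) : String :=
  String.ofList (((s.toList.reverse).dropWhile (fun c => c ∈ ".,!?;:".toList)).reverse)

def pvFinalize (es : List String) : List String :=
  es.filterMap (fun e => if pvRstripPunct e = "" then none else some (PySem.Str.lower (pvRstripPunct e)))

-- ===== PORT A =====
-- the for-loop, state = (entities, current)
def pvLoopA (b_tag i_tag : String) : List (String × String) → List String → List String → List String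
  | [], entities, current =>
      if current ≠ [] then entities ++ [PySem.Str.join " " current] else entities
  | (word, label) :: rest, entities, current =>
      if label = b_tag then
        pvLoopA b_tag i_tag rest
          (if current ≠ [] then entities ++ [PySem.Str.join " " current] else entities) [word]
      else if label = i_tag ∧ current ≠ [] then
        pvLoopA b_tag i_tag rest entities (current ++ [word])
      else
        if current ≠ [] then pvLoopA b_tag i_tag rest (entities ++ [PySem.Str.join " " current]) []
        else pvLoopA b_tag i_tag rest entities []

def collect_spans_py (pairs : List (String × String)) (b_tag : String) (i_tag : String) : List String :=
  pvFinalize (pvLoopA b_tag i_tag pairs [] [])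

-- ===== PORT B =====
-- inner loop: collect following tokens with label == i_tag and label != b_tag; return (extension, remainder)
def pvTakeExt (b_tag i_tag : String) : List (String × String) → List String × List (String × String)
  | [] => ([], [])
  | (word, label) :: rest =>
      if label = i_tag ∧ label ≠ b_tag then
        let p := pvTakeExt b_tag i_tag rest
        (word :: p.1, p.2)
      else ([], (word, label) :: rest)

theorem pvTakeExt_snd_length (b_tag i_tag : String) (xs : List (String × String)) :
    (pvTakeExt b_tag i_tag xs).2.length ≤ xs.length := by
  induction xs with
  | nil => simp [pvTakeExt]
  | cons x rest ih =>
      obtain ⟨w, l⟩ := x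
      simp only [pvTakeExt]
      split
      · exact Nat.le_succ_of_le ih
      · simp

-- outer scan: skip until a B-tagged token, then emit the whole span and resume after it
def pvSpansB (b_tag i_tag : String) : List (String × String) → List String
  | [] => []
  | (word, label) :: rest =>
      if label = b_tag then
        let p := pvTakeExt b_tag i_tag rest
        PySem.Str.join " " (word :: p.1) :: pvSpansB b_tag i_tag p.2
      else pvSpansB b_tag i_tag rest
termination_by xs => xs.length
decreasing_by
  · exact Nat.lt_succ_of_le (pvTakeExt_snd_length b_tag i_tag rest)
  · simp

def collect_spans_py_alt (pairs : List (String × String)) (b_tag : String) (i_tag : String) : List String :=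
  pvFinalize (pvSpansB b_tag i_tag pairs)

-- ===== PRECONDITION & SPEC =====
def Spec_collect_spans_py (pairs : List (String × String)) (b_tag : String) (i_tag : String) (out : List String) : Prop := out = collect_spans_py_alt pairs b_tag i_tag
instance (pairs : List (String × String)) (b_tag : String) (i_tag : String) (out : List String) : Decidable (Spec_collect_spans_py pairs b_tag i_tag out) := by unfold Spec_collect_spans_py; infer_instance

-- ===== CLAIM (what is proved, stated in full; the proofs are below) =====
def Claim_equal_collect_spans_py : Prop := ∀ (pairs : List (String × String)) (b_tag : String) (i_tag : String), Dom_collect_spans_py pairs b_tag i_tag → Spec_collect_spans_py pairs b_tag i_tag (collect_spans_py pairs b_tag i_tag)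

-- ===== LEMMAS AND PROOFS =====

-- Main invariant: A's loop with empty buffer produces B's spans appended to the
-- accumulated entities; with a nonempty buffer it produces that buffer extended by
-- B's inner loop, then B's spans on the remainder.
theorem pvLoop_inv (b_tag i_tag : String) (pairs : List (String × String)) :
    (∀ entities, pvLoopA b_tag i_tag pairs entities [] = entities ++ pvSpansB b_tag i_tag pairs) ∧
    (∀ entities cur, cur ≠ [] →
      pvLoopA b_tag i_tag pairs entities cur =
        entities ++ PySem.Str.join " " (cur ++ (pvTakeExt b_tag i_tag pairs).1) ::
          pvSpansB b_tag i_tag (pvTakeExt b_tag i_tag pairs).2) := by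
  induction pairs with
  | nil =>
      refine ⟨fun entities => by simp [pvLoopA, pvSpansB], fun entities cur hcur => ?_⟩
      simp [pvLoopA, pvTakeExt, pvSpansB, hcur]
  | cons x rest ih =>
      obtain ⟨w, l⟩ := x
      obtain ⟨ih0, ih1⟩ := ih
      constructor
      · intro entities
        simp only [pvLoopA]
        by_cases hb : l = b_tag
        · rw [if_pos hb, if_neg (by simp)]
          rw [ih1 entities [w] (by simp)]
          simp [pvSpansB, hb]
        · rw [if_neg hb]
          have : ¬ (l = i_tag ∧ ([] : List String) ≠ []) := by simp
          rw [if_neg this, if_neg (by simp)]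
          rw [ih0 entities]
          simp [pvSpansB, hb]
      · intro entities cur hcur
        simp only [pvLoopA]
        by_cases hb : l = b_tag
        · subst hb
          rw [if_pos rfl, if_pos hcur]
          rw [ih1 (entities ++ [PySem.Str.join " " cur]) [w] (by simp)]
          have hext : pvTakeExt l i_tag ((w, l) :: rest) = ([], (w, l) :: rest) := by
            simp [pvTakeExt]
          rw [hext]
          simp [pvSpansB]
        · rw [if_neg hb]
          by_cases hi : l = i_tag
          · subst hi
            rw [if_pos ⟨rfl, hcur⟩]
            rw [ih1 entities (cur ++ [w]) (by simp)]
            have hext : pvTakeExt b_tag l ((w, l) :: rest) =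
                ((w :: (pvTakeExt b_tag l rest).1), (pvTakeExt b_tag l rest).2) := by
              simp [pvTakeExt, hb]
            rw [hext]
            simp
          · have : ¬ (l = i_tag ∧ cur ≠ []) := fun h => hi h.1
            rw [if_neg this, if_pos hcur]
            rw [ih0 (entities ++ [PySem.Str.join " " cur])]
            have hext : pvTakeExt b_tag i_tag ((w, l) :: rest) = ([], (w, l) :: rest) := by
              simp [pvTakeExt, hi]
            simp [hext, pvSpansB, hb]

-- ===== VERDICT (by name: the statement is the Claim_ definition above) =====
theorem collect_spans_py_spec : Claim_equal_collect_spans_py := by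
  intro pairs b_tag i_tag _
  unfold Spec_collect_spans_py collect_spans_py collect_spans_py_alt
  rw [(pvLoop_inv b_tag i_tag pairs).1 []]
  simp
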